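-- pv_equiv track=rewrite | github.com/remind-dev/codetree-TILs | 241030/아름다운 수/beautiful-number.py | is_beautiful
-- ===== SOURCE A (Python) =====
-- def is_beautiful(number):
--     # 주어진 숫자가 아름다운 수인지 확인
--     i = 0
--     length = len(number)
--     while i < length:
--         count = 1
--         while i + 1 < length and number[i] == number[i + 1]:
--             count += 1
--             i += 1
--         if int(number[i]) != count:
--             return False
--         i += 1
--     return True
-- ===== SOURCE B (Python) =====
-- def is_beautiful(number):
--     # Run-length encode the string in one pass, then validate each run.
--     runs = []
--     for ch in number:
--         if runs and runs[-1][0] == ch: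
--             runs[-1][1] += 1
--         else:
--             runs.append([ch, 1])
--     return all(int(ch) == n for ch, n in runs)
-- ===== Notes on version B (the rewrite author's own statement) =====
-- stated objective: simpler
-- what changed: B run-length-encodes the string in one fold (list of [char, count] runs) and then checks all runs with a single all(...), replacing A's interleaved while-loop with manual index arithmetic and early returns.
import Mathlib
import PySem

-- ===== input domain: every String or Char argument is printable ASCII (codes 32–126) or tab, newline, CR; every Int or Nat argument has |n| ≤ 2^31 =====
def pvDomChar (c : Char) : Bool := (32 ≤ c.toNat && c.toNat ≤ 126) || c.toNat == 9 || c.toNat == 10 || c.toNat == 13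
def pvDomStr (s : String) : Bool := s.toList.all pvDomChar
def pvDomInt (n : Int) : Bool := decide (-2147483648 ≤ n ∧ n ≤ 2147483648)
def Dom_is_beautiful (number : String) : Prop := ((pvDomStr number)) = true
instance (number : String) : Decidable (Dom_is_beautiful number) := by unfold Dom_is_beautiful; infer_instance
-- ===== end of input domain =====

-- B run-length-encodes the string in one fold and then validates every run, instead of A's
-- interleaved index-arithmetic scan with early return (objective: simpler; same O(n) cost).

-- int(c) for a single character: value of a decimal digit, none = ValueError (excluded by Pre_)
def pvDigit? (c : Char) : Option Nat := if c.isDigit then some (c.toNat - 48) else none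

-- ===== PORT A =====
-- inner while: count the current run (comparing each char to its successor) and return
-- the run length together with the characters after the run
def pvRunA (c : Char) : List Char → Nat × List Char
  | [] => (1, [])
  | d :: rest =>
      if c = d then
        let p := pvRunA d rest
        (p.1 + 1, p.2)
      else (1, d :: rest)

theorem pvRunA_snd_length (c : Char) (l : List Char) : (pvRunA c l).2.length ≤ l.length := by
  induction l generalizing c with
  | nil => simp [pvRunA]
  | cons d rest ih =>
      simp only [pvRunA]
      split
      · exact Nat.le_succ_of_le (ih d)
      · simp

-- outer while of A
def pvLoopA : List Char → Bool
  | [] => true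
  | c :: rest =>
      let p := pvRunA c rest
      match pvDigit? c with
      | none => false                 -- Python: int(...) raises ValueError; excluded by Pre_
      | some v => if v ≠ p.1 then false else pvLoopA p.2
termination_by l => l.length
decreasing_by
  simpa using Nat.lt_succ_of_le (pvRunA_snd_length c rest)

def is_beautiful (number : String) : Bool := pvLoopA number.toList

-- ===== PORT B =====
-- one fold step of Source B's loop: extend the last run or start a new one
def pvStepB (runs : List (Char × Nat)) (ch : Char) : List (Char × Nat) :=
  match runs.getLast? with
  | some p => if p.1 = ch then runs.dropLast ++ [(p.1, p.2 + 1)] else runs ++ [(ch, 1)]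
  | none => [(ch, 1)]

def is_beautiful_alt (number : String) : Bool :=
  (number.toList.foldl pvStepB []).all (fun r => pvDigit? r.1 == some r.2)

-- ===== PRECONDITION & SPEC =====
-- Pre_ excludes exactly the inputs on which A raises ValueError (B raises there too): a string
-- whose first run with a non-digit head is reached with every earlier run valid (digit d, length d).
def pvPreAux (c : Char) (k : Nat) : List Char → Bool
  | [] => true
  | d :: rest =>
      if d = c then pvPreAux c (k + 1) rest
      else if c.toNat - 48 = k then d.isDigit && pvPreAux d 1 rest
      else true

def pvPreOk : List Char → Bool
  | [] => true
  | c :: rest => c.isDigit && pvPreAux c 1 rest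

def Pre_is_beautiful (number : String) : Prop := pvPreOk number.toList = true

instance (number : String) : Decidable (Pre_is_beautiful number) := by
  unfold Pre_is_beautiful; infer_instance

def pvWitness_is_beautiful : String := "122333"

def Spec_is_beautiful (number : String) (out : Bool) : Prop := out = is_beautiful_alt number
instance (number : String) (out : Bool) : Decidable (Spec_is_beautiful number out) := by unfold Spec_is_beautiful; infer_instance

-- ===== CLAIM (what is proved, stated in full; the proofs are below) =====
def Claim_equal_is_beautiful : Prop := ∀ (number : String), Dom_is_beautiful number → Pre_is_beautiful number → Spec_is_beautiful number (is_beautiful number)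

-- ===== LEMMAS AND PROOFS =====

-- span-based run-length encoding, the common reference form for both ports
def pvRLE : List Char → List (Char × Nat)
  | [] => []
  | c :: rest => (c, (rest.takeWhile (· == c)).length + 1) :: pvRLE (rest.dropWhile (· == c))
termination_by l => l.length
decreasing_by
  simpa using Nat.lt_succ_of_le (List.length_dropWhile_le (· == c) rest)

theorem pvRunA_eq (c : Char) (l : List Char) :
    pvRunA c l = ((l.takeWhile (· == c)).length + 1, l.dropWhile (· == c)) := by
  induction l generalizing c with
  | nil => simp [pvRunA]
  | cons d rest ih =>
      simp only [pvRunA, List.takeWhile, List.dropWhile]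
      by_cases h : c = d
      · subst h
        simp [ih c]
      · have : (d == c) = false := by simp [Ne.symm h]
        simp [h, this]

theorem pvFoldB_eq (l : List Char) (pre : List (Char × Nat)) (c : Char) (k : Nat) :
    l.foldl pvStepB (pre ++ [(c, k)]) =
      pre ++ [(c, k + (l.takeWhile (· == c)).length)] ++ pvRLE (l.dropWhile (· == c)) := by
  induction l generalizing pre c k with
  | nil => simp [pvRLE]
  | cons d rest ih =>
      simp only [List.foldl]
      by_cases h : c = d
      · subst h
        have hstep : pvStepB (pre ++ [(c, k)]) c = pre ++ [(c, k + 1)] := by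
          simp [pvStepB, List.getLast?_append, List.dropLast_append_of_ne_nil]
        rw [hstep, ih pre c (k + 1)]
        simp only [List.takeWhile, List.dropWhile, beq_self_eq_true]
        simp [Nat.add_comm, Nat.add_assoc]
      · have hne : (d == c) = false := by simp [Ne.symm h]
        have hstep : pvStepB (pre ++ [(c, k)]) d = (pre ++ [(c, k)]) ++ [(d, 1)] := by
          simp [pvStepB, List.getLast?_append, h]
        rw [hstep, ih (pre ++ [(c, k)]) d 1]
        simp [List.takeWhile, List.dropWhile, hne, pvRLE, Nat.add_comm]

theorem pvFoldB_rle (l : List Char) : l.foldl pvStepB [] = pvRLE l := by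
  cases l with
  | nil => simp [pvRLE]
  | cons c rest =>
      have hstep : pvStepB [] c = [] ++ [(c, 1)] := by simp [pvStepB]
      simp only [List.foldl, hstep]
      rw [pvFoldB_eq rest [] c 1]
      simp [pvRLE, Nat.add_comm]

theorem pvPreAux_eq (l : List Char) (c : Char) (k : Nat) :
    pvPreAux c k l =
      if c.toNat - 48 = k + (l.takeWhile (· == c)).length then pvPreOk (l.dropWhile (· == c))
      else true := by
  induction l generalizing c k with
  | nil => simp [pvPreAux, pvPreOk]
  | cons d rest ih =>
      simp only [pvPreAux, List.takeWhile, List.dropWhile]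
      by_cases h : d = c
      · subst h
        simp only [beq_self_eq_true, if_true, ih]
        have h2 : k + 1 + (rest.takeWhile (· == d)).length = k + ((rest.takeWhile (· == d)).length + 1) := by omega
        rw [h2]
        simp only [List.length_cons]
        rfl
      · have : (d == c) = false := by simp [h]
        simp [h, this, pvPreOk]

theorem pvMain (n : Nat) (l : List Char) (hn : l.length ≤ n)
    (h : pvPreOk l = true) :
    pvLoopA l = (pvRLE l).all (fun r => pvDigit? r.1 == some r.2) := by
  induction n generalizing l with
  | zero =>
      have : l = [] := List.length_eq_zero_iff.mp (Nat.le_zero.mp hn)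
      subst this; simp [pvLoopA, pvRLE]
  | succ m ih =>
      cases l with
      | nil => simp [pvLoopA, pvRLE]
      | cons c rest =>
          rw [pvPreOk] at h
          have hdig : c.isDigit = true := by
            by_contra hc
            simp [hc] at h
          rw [Bool.and_eq_true, pvPreAux_eq] at h
          have h := h.2
          rw [pvRLE]
          simp only [pvLoopA, pvRunA_eq, pvDigit?, hdig, if_true, List.all_cons]
          by_cases hv : c.toNat - 48 = (rest.takeWhile (· == c)).length + 1
          · have hpre : pvPreOk (rest.dropWhile (· == c)) = true := by
              have hv' : c.toNat - 48 = 1 + (rest.takeWhile (· == c)).length := by omega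
              rwa [if_pos hv'] at h
            have hlen : (rest.dropWhile (· == c)).length ≤ m := by
              have := List.length_dropWhile_le (· == c) rest
              simp at hn
              omega
            simp only [hv, ne_eq, not_true_eq_false, if_false]
            rw [ih _ hlen hpre]
            simp [pvDigit?]
          · simp [hv]

-- ===== VERDICT (by name: the statement is the Claim_ definition above) =====
theorem is_beautiful_spec : Claim_equal_is_beautiful := by
  intro number _ hpre
  unfold Spec_is_beautiful is_beautiful is_beautiful_alt
  rw [pvFoldB_rle]
  exact pvMain number.toList.length number.toList (Nat.le_refl _) hpre
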